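-- pv_equiv track=rewrite | github.com/nitzanshifris/CV2WEB-CORSUR | app/site-builder/core/creative_resume_parser.py | _split_education
-- ===== SOURCE A (Python) =====
-- def _split_education(education_section: str) -> list[str]:
--     """Split education section into individual entries."""
--     education = []
--     current_edu = []
--
--     for line in education_section.split("\n"):
--         if "Graduated" in line:
--             if current_edu:
--                 education.append("\n".join(current_edu))
--             current_edu = [line]
--         elif line.strip():
--             current_edu.append(line)
--
--     if current_edu:
--         education.append("\n".join(current_edu))
--
--     return education
-- ===== SOURCE B (Python) =====
-- def _split_education(education_section: str) -> list[str]: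
--     """Split education section into entries, building the chunk list back-to-front."""
--     chunks = [[]]
--     for line in reversed(education_section.split("\n")):
--         if "Graduated" in line:
--             chunks[0].insert(0, line)
--             chunks.insert(0, [])
--         elif line.strip():
--             chunks[0].insert(0, line)
--     return ["\n".join(c) for c in chunks if c]
-- ===== Notes on version B (the rewrite author's own statement) =====
-- stated objective: alternative
-- what changed: B traverses the lines back-to-front once, building a list of line-chunks (prepending into the front chunk, opening a new chunk at each 'Graduated' marker) and only joins and filters the chunks at the end, instead of A's forward accumulator that eagerly joins and appends finished entries.
import Mathlib
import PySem

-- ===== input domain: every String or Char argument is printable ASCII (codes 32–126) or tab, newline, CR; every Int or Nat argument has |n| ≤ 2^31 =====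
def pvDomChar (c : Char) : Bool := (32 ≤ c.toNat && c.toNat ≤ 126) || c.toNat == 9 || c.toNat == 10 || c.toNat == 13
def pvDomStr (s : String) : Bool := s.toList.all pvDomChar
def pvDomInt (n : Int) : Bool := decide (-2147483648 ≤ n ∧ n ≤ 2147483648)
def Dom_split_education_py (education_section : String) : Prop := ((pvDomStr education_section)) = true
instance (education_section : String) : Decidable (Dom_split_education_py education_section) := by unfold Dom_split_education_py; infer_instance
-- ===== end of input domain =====

-- B builds the list of chunks back-to-front (one pass over the reversed lines, joining and filtering
-- only at the end) instead of A's forward accumulator that joins eagerly; objective: alternative decomposition.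

-- ===== PORT A =====
-- the loop body of A (state = (education, current_edu), current_edu kept as its list of lines)
def pvAStep (st : List String × List String) (line : String) : List String × List String :=
  if PySem.Str.isIn "Graduated" line then
    (if st.2 ≠ [] then st.1 ++ [PySem.Str.join "\n" st.2] else st.1, [line])
  else if PySem.Str.strip line ≠ "" then
    (st.1, st.2 ++ [line])
  else st

-- the final 'if current_edu: education.append("\n".join(current_edu))'
def pvFinishA (st : List String × List String) : List String :=
  if st.2 ≠ [] then st.1 ++ [PySem.Str.join "\n" st.2] else st.1

-- s.split("\n") has a non-empty separator, so split? is always 'some'; getD [] is unreachable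
def split_education_py (education_section : String) : List String :=
  pvFinishA (((PySem.Str.split? education_section "\n").getD []).foldl pvAStep ([], []))

-- ===== PORT B =====
-- Source B iterates over reversed(lines) prepending into the front chunk; as a transcription this is a
-- foldr over the lines. The [] case of the match is unreachable (the chunk list is never empty).
def pvBStep (line : String) (chunks : List (List String)) : List (List String) :=
  match chunks with
  | c :: rest =>
    if PySem.Str.isIn "Graduated" line then [] :: (line :: c) :: rest
    else if PySem.Str.strip line ≠ "" then (line :: c) :: rest
    else c :: rest
  | [] => []

-- the final comprehension '["\n".join(c) for c in chunks if c]'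
def pvFinishB (chunks : List (List String)) : List String :=
  (chunks.filter (fun c => c ≠ [])).map (PySem.Str.join "\n")

def split_education_py_alt (education_section : String) : List String :=
  pvFinishB (((PySem.Str.split? education_section "\n").getD []).foldr pvBStep [[]])

-- ===== PRECONDITION & SPEC =====
def Spec_split_education_py (education_section : String) (out : List String) : Prop := out = split_education_py_alt education_section
instance (education_section : String) (out : List String) : Decidable (Spec_split_education_py education_section out) := by unfold Spec_split_education_py; infer_instance

-- ===== CLAIM (what is proved, stated in full; the proofs are below) =====
def Claim_equal_split_education_py : Prop := ∀ (education_section : String), Dom_split_education_py education_section → Spec_split_education_py education_section (split_education_py education_section)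

-- ===== LEMMAS AND PROOFS =====

-- prepend the pending lines 'cur' onto B's front chunk
def pvConsHead (cur : List String) (chunks : List (List String)) : List (List String) :=
  match chunks with
  | c :: rest => (cur ++ c) :: rest
  | [] => [cur]

theorem pvB_foldr_ne_nil (ls : List String) : ls.foldr pvBStep [[]] ≠ [] := by
  induction ls with
  | nil => simp
  | cons l ls ih =>
    simp only [List.foldr_cons]
    cases h : ls.foldr pvBStep [[]] with
    | nil => exact absurd h ih
    | cons c rest => simp only [pvBStep]; split_ifs <;> simp

theorem pv_key (ls : List String) : ∀ (edu cur : List String),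
    pvFinishA (ls.foldl pvAStep (edu, cur))
      = edu ++ pvFinishB (pvConsHead cur (ls.foldr pvBStep [[]])) := by
  induction ls with
  | nil =>
    intro edu cur
    by_cases h : cur = [] <;>
      simp [h, pvFinishA, pvFinishB, pvConsHead, List.filter]
  | cons l ls ih =>
    intro edu cur
    simp only [List.foldl_cons, List.foldr_cons]
    cases hC : ls.foldr pvBStep [[]] with
    | nil => exact absurd hC (pvB_foldr_ne_nil ls)
    | cons c rest =>
      simp only [pvAStep, pvBStep]
      split_ifs with hg hc hs
      · rw [ih, hC]
        simp [pvConsHead, pvFinishB, List.filter, hc]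
      · rw [ih, hC]
        simp [pvConsHead, pvFinishB, List.filter, hc]
      · rw [ih, hC]
        simp [pvConsHead, List.append_assoc]
      · rw [ih, hC]

-- ===== VERDICT (by name: the statement is the Claim_ definition above) =====
theorem split_education_py_spec : Claim_equal_split_education_py := by
  intro s _
  unfold Spec_split_education_py split_education_py split_education_py_alt
  rw [pv_key]
  cases hC : ((PySem.Str.split? s "\n").getD []).foldr pvBStep [[]] with
  | nil => exact absurd hC (pvB_foldr_ne_nil _)
  | cons c rest => simp [pvConsHead]
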